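-- pv_equiv track=rewrite | github.com/yusabari/acmicpc | 23304.py | isAKARAKA
-- ===== SOURCE A (Python) =====
-- import math
--
-- def isAKARAKA(strIn):
--     lenInput = len(strIn)
--     if lenInput == 1:
--         return True
--     else:
--         lenHalfInput = math.floor(lenInput / 2)
--
--         for i in range(lenHalfInput + 1):
--             if not strIn[i] == strIn[lenInput - 1 - i]:
--                 return False
--
--         return isAKARAKA(strIn[0:lenHalfInput])
-- ===== SOURCE B (Python) =====
-- def isAKARAKA(strIn):
--     n = len(strIn)
--     while n > 1:
--         p = strIn[:n]
--         if p != p[::-1]: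
--             return False
--         n //= 2
--     return True
-- ===== Notes on version B (the rewrite author's own statement) =====
-- stated objective: alternative
-- what changed: Replaced the recursion-with-index-loop by a single iterative loop that tracks only the current prefix length and checks each prefix via reversed-slice comparison (p != p[::-1]) instead of explicit index pairs.
-- outside the precondition, e.g. on isAKARAKA(''): A raises IndexError, B returns True
import Mathlib
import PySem

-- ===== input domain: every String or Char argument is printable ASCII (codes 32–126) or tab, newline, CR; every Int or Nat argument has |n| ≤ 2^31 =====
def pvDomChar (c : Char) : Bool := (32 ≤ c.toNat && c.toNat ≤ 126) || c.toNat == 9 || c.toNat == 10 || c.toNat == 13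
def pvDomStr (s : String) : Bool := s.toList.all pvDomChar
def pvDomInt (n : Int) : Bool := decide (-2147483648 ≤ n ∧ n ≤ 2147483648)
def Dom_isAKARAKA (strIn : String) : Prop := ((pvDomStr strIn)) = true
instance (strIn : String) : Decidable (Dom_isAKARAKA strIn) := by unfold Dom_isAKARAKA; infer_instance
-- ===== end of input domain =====

-- B replaces A's recursion-with-index-loop by one iterative loop tracking only the current
-- prefix length, checking each prefix by reversed-slice comparison (objective: alternative).

-- ===== PORT A =====
-- for i in range(lenHalfInput + 1): if not strIn[i] == strIn[lenInput - 1 - i]: return False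
def pvAFor (t : List Char) (n h i : Nat) : Bool :=
  if i < h + 1 then
    match PySem.List.pyGet? t (i : Int), PySem.List.pyGet? t ((n : Int) - 1 - (i : Int)) with
    | some a, some b => if a = b then pvAFor t n h (i + 1) else false
    | _, _ => false   -- IndexError in Python (reachable only from the empty string, outside Pre_)
  else true
termination_by h + 1 - i

-- the recursive body of A; math.floor(len/2) on these lengths is exactly Nat division by 2
def pvACore (l : List Char) : Bool :=
  if l.length = 0 then false   -- totality guard only: Python raises IndexError on "" (outside Pre_)
  else if l.length = 1 then true
  else
    let h := l.length / 2
    if pvAFor l l.length h 0 then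
      pvACore (PySem.List.slice l (some (0 : Int)) (some (h : Int)))   -- strIn[0:lenHalfInput]
    else false
termination_by l.length
decreasing_by
  simp only [PySem.List.slice_zero_start, PySem.List.slice_to_natCast, List.length_take]
  omega

def isAKARAKA (strIn : String) : Bool := pvACore strIn.toList

-- ===== PORT B =====
def pvBLoop (s : List Char) (n : Nat) : Bool :=
  if n > 1 then
    let p := PySem.List.slice s none (some (n : Int))   -- strIn[:n]
    if p = p.reverse then pvBLoop s (n / 2)             -- p != p[::-1] → return False
    else false
  else true
termination_by n

def isAKARAKA_alt (strIn : String) : Bool := pvBLoop strIn.toList strIn.toList.length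

-- ===== PRECONDITION & SPEC =====
-- Pre_ excludes only the empty string, on which A raises IndexError.
def Pre_isAKARAKA (strIn : String) : Prop := strIn ≠ ""
instance (strIn : String) : Decidable (Pre_isAKARAKA strIn) := by unfold Pre_isAKARAKA; infer_instance
def pvWitness_isAKARAKA : String := "a"

def Spec_isAKARAKA (strIn : String) (out : Bool) : Prop := out = isAKARAKA_alt strIn
instance (strIn : String) (out : Bool) : Decidable (Spec_isAKARAKA strIn out) := by unfold Spec_isAKARAKA; infer_instance

-- ===== CLAIM (what is proved, stated in full; the proofs are below) =====
def Claim_equal_isAKARAKA : Prop := ∀ (strIn : String), Dom_isAKARAKA strIn → Pre_isAKARAKA strIn → Spec_isAKARAKA strIn (isAKARAKA strIn)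

-- ===== LEMMAS AND PROOFS =====

-- A's inner for-loop checks the mirrored index pairs from i up to h
theorem pvAFor_iff (t : List Char) (n h : Nat) (hn : n = t.length) (h1 : 1 ≤ n)
    (hh : h = n / 2) : ∀ i, (pvAFor t n h i = true ↔ ∀ j, i ≤ j → j ≤ h → t[j]? = t[n - 1 - j]?) := by
  have key : ∀ k i, h + 1 - i ≤ k →
      (pvAFor t n h i = true ↔ ∀ j, i ≤ j → j ≤ h → t[j]? = t[n - 1 - j]?) := by
    intro k
    induction k with
    | zero =>
      intro i hi
      rw [pvAFor, if_neg (by omega)]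
      constructor
      · intro _ j hij hjh; omega
      · intro _; rfl
    | succ k IH =>
      intro i hi
      by_cases hc : i < h + 1
      · have hilen : i < t.length := by omega
        have hmlen : n - 1 - i < t.length := by omega
        have hcast : (n : Int) - 1 - (i : Int) = ((n - 1 - i : Nat) : Int) := by omega
        rw [pvAFor, if_pos hc, hcast]
        rw [PySem.List.pyGet?_natCast, PySem.List.pyGet?_natCast,
            List.getElem?_eq_getElem hilen, List.getElem?_eq_getElem hmlen]
        simp only []
        by_cases he : t[i] = t[n - 1 - i]
        · rw [if_pos he, IH (i + 1) (by omega)]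
          constructor
          · intro H j hij hjh
            rcases Nat.eq_or_lt_of_le hij with rfl | hlt
            · rw [List.getElem?_eq_getElem hilen, List.getElem?_eq_getElem hmlen, he]
            · exact H j hlt hjh
          · intro H j hij hjh
            exact H j (by omega) hjh
        · rw [if_neg he]
          constructor
          · intro H; exact absurd H (by simp)
          · intro H
            have := H i le_rfl (by omega)
            rw [List.getElem?_eq_getElem hilen, List.getElem?_eq_getElem hmlen] at this
            exact absurd (Option.some.inj this) he
      · rw [pvAFor, if_neg hc]
        constructor
        · intro _ j hij hjh; omega
        · intro _; rfl
  intro i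
  exact key (h + 1 - i) i le_rfl

-- mirrored equality up to the half index is exactly being a palindrome
theorem pal_iff (t : List Char) (h1 : 1 ≤ t.length) :
    (∀ j, 0 ≤ j → j ≤ t.length / 2 → t[j]? = t[t.length - 1 - j]?) ↔ t = t.reverse := by
  constructor
  · intro H
    apply List.ext_getElem?
    intro k
    by_cases hk : k < t.length
    · rw [List.getElem?_reverse hk]
      by_cases hhalf : k ≤ t.length / 2
      · exact H k (Nat.zero_le _) hhalf
      · have hj := H (t.length - 1 - k) (Nat.zero_le _) (by omega)
        have hkk : t.length - 1 - (t.length - 1 - k) = k := by omega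
        rw [hkk] at hj
        exact hj.symm
    · rw [List.getElem?_eq_none (by omega), List.getElem?_eq_none (by simp; omega)]
  · intro H j _ hj
    have hjlen : j < t.length := by omega
    rw [← List.getElem?_reverse hjlen, ← H]

-- loop invariant: B's state (s, m) corresponds to A's current segment s.take m
theorem pvBLoop_eq (m : Nat) : ∀ (l : List Char), 1 ≤ m → m ≤ l.length →
    pvBLoop l m = pvACore (l.take m) := by
  induction m using Nat.strong_induction_on with
  | _ m IH =>
  intro l h1 hle
  by_cases hm : 1 < m
  · rw [pvBLoop, if_pos hm, PySem.List.slice_to_natCast]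
    have hlen : (l.take m).length = m := by simp; omega
    rw [pvACore, hlen]
    rw [if_neg (show ¬ (m = 0) by omega), if_neg (show ¬ (m = 1) by omega)]
    have hfor : pvAFor (l.take m) m (m / 2) 0 = true ↔
        l.take m = (l.take m).reverse := by
      rw [pvAFor_iff (l.take m) m (m / 2) hlen.symm (by omega) rfl 0]
      have hp := pal_iff (l.take m) (by omega)
      rw [hlen] at hp
      exact hp
    by_cases he : l.take m = (l.take m).reverse
    · rw [if_pos he, if_pos (hfor.mpr he)]
      have hslice : PySem.List.slice (l.take m) (some (0 : Int))
          (some ((m / 2 : Nat) : Int)) = l.take (m / 2) := by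
        rw [PySem.List.slice_zero_start, PySem.List.slice_to_natCast, List.take_take]
        congr 1
        omega
      rw [hslice]
      exact IH (m / 2) (by omega) l (by omega) (by omega)
    · rw [if_neg he, if_neg (show ¬ (pvAFor (l.take m) m (m / 2) 0 = true) from
        fun hh => he (hfor.mp hh))]
  · have hm1 : m = 1 := by omega
    subst hm1
    have hlen : (l.take 1).length = 1 := by simp; omega
    rw [pvBLoop, if_neg (by omega), pvACore, if_neg (by omega), if_pos hlen]

-- ===== VERDICT (by name: the statement is the Claim_ definition above) =====
theorem isAKARAKA_spec : Claim_equal_isAKARAKA := by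
  intro s _ hpre
  unfold Spec_isAKARAKA isAKARAKA isAKARAKA_alt
  have hne : s.toList ≠ [] := by simpa [String.toList_eq_nil_iff] using hpre
  have h1 : 1 ≤ s.toList.length := List.length_pos_iff.mpr hne
  rw [pvBLoop_eq _ _ h1 le_rfl, List.take_length]
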